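-- pv_equiv track=rewrite | github.com/Twaruzek/inzynierka_kod | test/serweralmost/app.py | Active_Page
-- ===== SOURCE A (Python) =====
-- active=["","","","","","","","","",""]
--
-- def Active_Page(x):
-- 	x=int(x)
-- 	for i in range(10):
-- 		if i == x :
-- 			active[i] = "active"
-- 		else:
-- 			active[i] = ""
-- 	return active
-- ===== SOURCE B (Python) =====
-- active=["","","","","","","","","",""]
--
-- def Active_Page(x):
--     x = int(x)
--     if 0 <= x < 10:
--         row = [""] * x + ["active"] + [""] * (9 - x)
--     else:
--         row = [""] * 10
--     active[:] = row
--     return active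
-- ===== Notes on version B (the rewrite author's own statement) =====
-- stated objective: simpler
-- what changed: Instead of iterating over all 10 slots and writing each one with a compare-and-branch, B constructs the result row directly by concatenation: a prefix of x blanks, the 'active' marker, and a suffix of 9-x blanks (all blanks when x is out of range).
import Mathlib
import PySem

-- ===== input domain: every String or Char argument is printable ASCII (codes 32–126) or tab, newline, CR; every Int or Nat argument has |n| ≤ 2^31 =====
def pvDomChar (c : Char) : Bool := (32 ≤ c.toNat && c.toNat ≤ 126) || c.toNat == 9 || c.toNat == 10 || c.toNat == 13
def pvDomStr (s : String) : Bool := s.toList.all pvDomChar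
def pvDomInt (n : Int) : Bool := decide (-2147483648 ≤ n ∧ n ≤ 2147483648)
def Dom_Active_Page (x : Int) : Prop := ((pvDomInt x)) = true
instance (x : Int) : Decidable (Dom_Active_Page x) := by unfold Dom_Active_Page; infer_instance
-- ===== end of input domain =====

-- B builds the row by concatenation (x blanks ++ marker ++ 9-x blanks) instead of A's
-- per-slot compare-and-write loop (simpler). The Python versions mutate the module-level
-- `active` list in place; the equivalence proved here is about the return value.

-- ===== PORT A =====
-- loop `for i in range(10): active[i] = "active" if i == x else ""` as a fold over the range
def Active_Page (x : Int) : List String :=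
  (PySem.List.pyRange 0 10 1).foldl
    (fun acc i => if i == x then acc.set i.toNat "active" else acc.set i.toNat "")
    ["", "", "", "", "", "", "", "", "", ""]

-- ===== PORT B =====
def Active_Page_alt (x : Int) : List String :=
  if 0 ≤ x ∧ x < 10 then
    List.replicate x.toNat "" ++ ["active"] ++ List.replicate (9 - x).toNat ""
  else
    List.replicate 10 ""

-- ===== PRECONDITION & SPEC =====
def Spec_Active_Page (x : Int) (out : List String) : Prop := out = Active_Page_alt x
instance (x : Int) (out : List String) : Decidable (Spec_Active_Page x out) := by unfold Spec_Active_Page; infer_instance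

-- ===== CLAIM =====
def Claim_equal_Active_Page : Prop := ∀ (x : Int), Dom_Active_Page x → Spec_Active_Page x (Active_Page x)

-- ===== LEMMAS AND PROOFS =====
theorem pyRange_ten : PySem.List.pyRange 0 10 1 = [0,1,2,3,4,5,6,7,8,9] := by decide

-- ===== VERDICT =====
theorem Active_Page_spec : Claim_equal_Active_Page := by
  intro x _
  unfold Spec_Active_Page Active_Page Active_Page_alt
  rw [pyRange_ten]
  by_cases h : 0 ≤ x ∧ x < 10
  · obtain ⟨h0, h1⟩ := h
    interval_cases x <;> decide
  · rw [if_neg h]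
    simp only [List.foldl, beq_iff_eq]
    rw [if_neg (by omega), if_neg (by omega), if_neg (by omega), if_neg (by omega),
        if_neg (by omega), if_neg (by omega), if_neg (by omega), if_neg (by omega),
        if_neg (by omega), if_neg (by omega)]
    decide
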